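-- pv_equiv track=rewrite | github.com/pepyakasoftware/zhazha | markov/markov.py | _gen_trigrams
-- ===== SOURCE A (Python) =====
-- def _gen_trigrams(tokens):
--     t0, t1 = '$', '$'
--     for t2 in tokens:
--         if t0 == t1 == "$" and not t2.isalpha():
--             t0, t1 = t1, t2
--             continue
--         yield t0, t1, t2
--         if t2 in '.!?':
--             yield t1, t2, '$'
--             yield t2, '$', '$'
--             t0, t1 = '$', '$'
--         else:
--             t0, t1 = t1, t2
-- ===== SOURCE B (Python) =====
-- # B: two-phase streaming decomposition — a normalizer that injects '$','$'
-- # sentence boundaries into the token stream, then a pure length-3 sliding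
-- # window that emits every consecutive triple except the dropped sentence-start
-- # triple ('$','$',non-alpha).
--
-- def _normalize(tokens):
--     # Emit the padded stream: leading '$','$', every token, and '$','$' after a
--     # sentence-ending punctuation token (unless that token sits right after a
--     # '$','$' boundary, where the original drops it without closing a sentence).
--     yield '$'
--     yield '$'
--     a, b = '$', '$'
--     for t in tokens:
--         yield t
--         if t in '.!?' and not (a == b == '$'):
--             yield '$'
--             yield '$'
--             a, b = '$', '$'
--         else:
--             a, b = b, t
--
--
-- def _gen_trigrams(tokens):
--     it = _normalize(tokens)
--     a = next(it)
--     b = next(it)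
--     for c in it:
--         if not (a == b == '$' and not c.isalpha()):
--             yield a, b, c
--         a, b = b, c
-- ===== Notes on version B (the rewrite author's own statement) =====
-- stated objective: alternative
-- what changed: A's monolithic generator with interleaved yield/skip/reset state logic is split into two composed streaming phases: a normalizer that injects '$','$' sentence boundaries into the token stream, then a pure length-3 sliding window that emits every consecutive triple except the dropped sentence-start triple ('$','$',non-alpha).
import Mathlib
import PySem

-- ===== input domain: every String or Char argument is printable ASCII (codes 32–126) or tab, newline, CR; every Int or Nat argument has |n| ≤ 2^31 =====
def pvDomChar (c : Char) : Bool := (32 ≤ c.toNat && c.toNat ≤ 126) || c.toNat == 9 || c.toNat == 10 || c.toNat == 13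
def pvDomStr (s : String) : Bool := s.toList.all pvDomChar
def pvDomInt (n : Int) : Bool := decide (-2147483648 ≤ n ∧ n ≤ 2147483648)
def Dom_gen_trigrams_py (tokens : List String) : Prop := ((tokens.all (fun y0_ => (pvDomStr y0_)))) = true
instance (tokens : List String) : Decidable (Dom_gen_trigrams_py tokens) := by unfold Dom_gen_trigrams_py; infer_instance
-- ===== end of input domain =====

-- B replaces A's one-pass state machine by a two-phase decomposition (boundary-normalized
-- stream, then a pure 3-window scan); same cost, objective: alternative.

-- ===== PORT A =====
-- the loop body of _gen_trigrams, state (t0, t1)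
def gen_trigrams_go (t0 t1 : String) : List String → List (String × String × String)
  | [] => []
  | t2 :: rest =>
    if t0 = "$" ∧ t1 = "$" ∧ ¬ PySem.Str.strIsalpha t2 = true then
      gen_trigrams_go t1 t2 rest
    else
      (t0, t1, t2) ::
        (if PySem.Str.isIn t2 ".!?" = true then
          (t1, t2, "$") :: (t2, "$", "$") :: gen_trigrams_go "$" "$" rest
        else
          gen_trigrams_go t1 t2 rest)

def gen_trigrams_py (tokens : List String) : List (String × String × String) :=
  gen_trigrams_go "$" "$" tokens

-- ===== PORT B =====
-- phase 1 of Source B: the boundary-normalized stream after the leading "$","$"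
def norm_go (a b : String) : List String → List String
  | [] => []
  | t :: rest =>
    if PySem.Str.isIn t ".!?" = true ∧ ¬ (a = "$" ∧ b = "$") then
      t :: "$" :: "$" :: norm_go "$" "$" rest
    else
      t :: norm_go b t rest

-- phase 2 of Source B: the length-3 sliding window with the sentence-start drop
def window3 : List String → List (String × String × String)
  | a :: b :: c :: rest =>
    if a = "$" ∧ b = "$" ∧ ¬ PySem.Str.strIsalpha c = true then
      window3 (b :: c :: rest)
    else
      (a, b, c) :: window3 (b :: c :: rest)
  | _ => []
  termination_by l => l.length

def gen_trigrams_py_alt (tokens : List String) : List (String × String × String) :=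
  window3 ("$" :: "$" :: norm_go "$" "$" tokens)

-- ===== PRECONDITION & SPEC =====
def Spec_gen_trigrams_py (tokens : List String) (out : List (String × String × String)) : Prop := out = gen_trigrams_py_alt tokens
instance (tokens : List String) (out : List (String × String × String)) : Decidable (Spec_gen_trigrams_py tokens out) := by unfold Spec_gen_trigrams_py; infer_instance

-- ===== CLAIM (what is proved, stated in full; the proofs are below) =====
def Claim_equal_gen_trigrams_py : Prop := ∀ (tokens : List String), Dom_gen_trigrams_py tokens → Spec_gen_trigrams_py tokens (gen_trigrams_py tokens)

-- ===== LEMMAS AND PROOFS =====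

-- the cons-equation of window3, stated once for rewriting
lemma window3_cons (a b c : String) (rest : List String) :
    window3 (a :: b :: c :: rest) =
      if a = "$" ∧ b = "$" ∧ ¬ PySem.Str.strIsalpha c = true then window3 (b :: c :: rest)
      else (a, b, c) :: window3 (b :: c :: rest) := by
  rw [window3]

-- a token that is a substring of ".!?" is never the literal "$"
lemma punct_ne_dollar (t : String) (h : PySem.Str.isIn t ".!?" = true) : t ≠ "$" := by
  intro he; subst he; revert h; decide

-- a token that is a substring of ".!?" is never alphabetic
lemma punct_not_alpha (t : String) (h : PySem.Str.isIn t ".!?" = true) :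
    PySem.Str.strIsalpha t = false := by
  rw [PySem.Str.strIsalpha_eq]
  have hinf : t.toList <:+: ".!?".toList := (PySem.Str.isIn_iff_infix _ _).mp h
  cases ht : t.toList with
  | nil => simp [PySem.Chars.strIsalpha]
  | cons c cs =>
    have hc : c ∈ ".!?".toList := (ht ▸ hinf).subset (by simp)
    have hca : PySem.Chars.isalpha c = false := by fin_cases hc <;> decide
    simp [PySem.Chars.strIsalpha, hca]

-- the window over the normalized stream replays A's state machine
lemma window3_norm_go (rest : List String) :
    ∀ a b, window3 (a :: b :: norm_go a b rest) = gen_trigrams_go a b rest := by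
  induction rest with
  | nil => intro a b; simp [norm_go, gen_trigrams_go, window3]
  | cons t rest ih =>
    intro a b
    by_cases hp : PySem.Str.isIn t ".!?" = true
    · have hna : ¬ PySem.Str.strIsalpha t = true := by
        rw [punct_not_alpha t hp]; decide
      by_cases hs : a = "$" ∧ b = "$"
      · -- skip branch of A: punct right after a boundary, dropped, no injection
        have hc : ¬ (PySem.Str.isIn t ".!?" = true ∧ ¬ (a = "$" ∧ b = "$")) :=
          fun hx => hx.2 hs
        have hcond : a = "$" ∧ b = "$" ∧ ¬ PySem.Str.strIsalpha t = true :=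
          ⟨hs.1, hs.2, hna⟩
        simp only [norm_go, if_neg hc]
        rw [window3_cons, if_pos hcond]
        simp only [gen_trigrams_go]
        rw [if_pos hcond]
        exact ih b t
      · -- punct yielded: the normalizer injects "$","$"; three window steps
        have hc : PySem.Str.isIn t ".!?" = true ∧ ¬ (a = "$" ∧ b = "$") := ⟨hp, hs⟩
        have h1 : ¬ (a = "$" ∧ b = "$" ∧ ¬ PySem.Str.strIsalpha t = true) :=
          fun hx => hs ⟨hx.1, hx.2.1⟩
        have h2 : ¬ (b = "$" ∧ t = "$" ∧ ¬ PySem.Str.strIsalpha "$" = true) :=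
          fun hx => punct_ne_dollar t hp hx.2.1
        have h3 : ¬ (t = "$" ∧ ("$" : String) = "$" ∧
            ¬ PySem.Str.strIsalpha "$" = true) :=
          fun hx => punct_ne_dollar t hp hx.1
        simp only [norm_go, if_pos hc]
        rw [window3_cons, if_neg h1, window3_cons, if_neg h2, window3_cons, if_neg h3]
        simp only [gen_trigrams_go]
        rw [if_neg h1, if_pos hp, ih "$" "$"]
    · -- non-punct token: both sides just slide the window
      have hc : ¬ (PySem.Str.isIn t ".!?" = true ∧ ¬ (a = "$" ∧ b = "$")) :=
        fun hx => hp hx.1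
      simp only [norm_go, if_neg hc]
      rw [window3_cons]
      simp only [gen_trigrams_go]
      by_cases hs : a = "$" ∧ b = "$" ∧ ¬ PySem.Str.strIsalpha t = true
      · rw [if_pos hs, if_pos hs]; exact ih b t
      · rw [if_neg hs, if_neg hs, if_neg hp, ih b t]

-- ===== VERDICT (by name: the statement is the Claim_ definition above) =====
theorem gen_trigrams_py_spec : Claim_equal_gen_trigrams_py := by
  intro tokens _
  unfold Spec_gen_trigrams_py gen_trigrams_py gen_trigrams_py_alt
  exact (window3_norm_go tokens "$" "$").symm
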